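-- pv_equiv track=rewrite | github.com/Opsimathy/IT5003 | Midterms/CS2040S 25S1/A.1 Special Largest Gap.py | specialLargestGap
-- ===== SOURCE A (Python) =====
-- from typing import List
--
-- def specialLargestGap(arr: List[int]) -> int:
--     def sod(n: int) -> int:
--         s = 0
--         while n:
--             s += n % 10
--             n //= 10
--         return s
--     m = [float('inf')] * 64
--     M = [-1] * 64
--     c = [0] * 64
--     for i in arr:
--         s = sod(i)
--         m[s] = min(m[s], i)
--         M[s] = max(M[s], i)
--         c[s] += 1
--     a = -1
--     for s in range(64):
--         if c[s] >= 2: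
--             a = max(a, M[s] - m[s])
--     return a
-- ===== SOURCE B (Python) =====
-- from typing import List
--
-- def specialLargestGap(arr: List[int]) -> int:
--     def sod(n: int) -> int:
--         s = 0
--         while n:
--             s += n % 10
--             n //= 10
--         return s
--     def go(lst):
--         if not lst:
--             return -1
--         x = lst[0]
--         s = sod(x)
--         same = [y for y in lst[1:] if sod(y) == s]
--         rest = [y for y in lst[1:] if sod(y) != s]
--         best = go(rest)
--         if same:
--             grp = same + [x]
--             best = max(best, max(grp) - min(grp))
--         return best
--     return go(arr)
-- ===== Notes on version B (the rewrite author's own statement) =====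
-- stated objective: alternative
-- what changed: Replaces A's single pass over fixed 64-slot min/max/count arrays plus a final 0..63 sweep with a partition recursion: peel off the entire digit-sum class of the first element via comprehensions, reduce it with built-in max/min, and recurse on the remaining elements; no indexed tables or incremental per-element state.
import Mathlib
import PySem

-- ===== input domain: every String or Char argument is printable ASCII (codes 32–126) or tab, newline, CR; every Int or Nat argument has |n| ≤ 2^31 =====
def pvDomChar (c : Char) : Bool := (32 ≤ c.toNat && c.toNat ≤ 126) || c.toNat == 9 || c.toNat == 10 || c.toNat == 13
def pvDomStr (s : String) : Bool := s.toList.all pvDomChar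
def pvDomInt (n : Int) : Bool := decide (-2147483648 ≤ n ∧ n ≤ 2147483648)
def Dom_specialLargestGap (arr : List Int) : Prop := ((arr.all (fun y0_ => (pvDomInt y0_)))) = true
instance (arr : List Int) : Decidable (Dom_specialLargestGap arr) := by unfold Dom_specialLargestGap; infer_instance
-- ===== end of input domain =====

-- B replaces A's single pass over fixed 64-slot min/max/count arrays (plus a 0..63 sweep) with a
-- partition recursion: peel off the first element's whole digit-sum class, reduce it with built-in
-- max/min, recurse on the rest (objective: alternative).

-- ===== PORT A =====
-- sod's while loop, with fuel n.natAbs (sufficient for n ≥ 0, the only case where Python's loop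
-- terminates; for n < 0 Python diverges — those inputs are outside Pre_ and nothing is claimed there)
def sodGo : Nat → Int → Int → Int
  | 0, _, s => s
  | f + 1, n, s => if n = 0 then s else sodGo f (PySem.Int.floordiv n 10) (s + PySem.Int.mod n 10)

def sodA (n : Int) : Int := sodGo n.natAbs n 0

def specialLargestGap (arr : List Int) : Int :=
  -- m's float('inf') sentinel is ported as none (min(inf, i) = i); list writes m[s] = … are List.set
  -- (Pre_ guarantees the index s is in range, where Python would otherwise raise IndexError)
  let st := arr.foldl
    (fun (st : List (Option Int) × List Int × List Int) i =>
      let s := (sodA i).toNat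
      (st.1.set s (some (match st.1.getD s none with | none => i | some v => min v i)),
       st.2.1.set s (max (st.2.1.getD s (-1)) i),
       st.2.2.set s (st.2.2.getD s 0 + 1)))
    (List.replicate 64 (none : Option Int), List.replicate 64 (-1 : Int), List.replicate 64 (0 : Int))
  (PySem.List.pyRange 0 64 1).foldl
    (fun a s =>
      if 2 ≤ st.2.2.getD s.toNat 0 then
        max a (st.2.1.getD s.toNat (-1) - (st.1.getD s.toNat none).getD 0)
      else a)
    (-1)

-- ===== PORT B =====
-- Source B's recursive go: 'if same:' is the match on the comprehension's result ([] vs z :: zs);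
-- max(grp)/min(grp) are PySem.List.max?/min? with the identity key
def goB : List Int → Int
  | [] => -1
  | x :: t =>
      let s := sodA x
      let same := t.filter (fun y => sodA y == s)
      let rest := t.filter (fun y => !(sodA y == s))
      let best := goB rest
      match same with
      | [] => best
      | z :: zs =>
          let grp := (z :: zs) ++ [x]
          match PySem.List.max? grp (fun y => y), PySem.List.min? grp (fun y => y) with
          | some hi, some lo => max best (hi - lo)
          | _, _ => best
termination_by lst => lst.length
decreasing_by
  have h2 := List.length_filter_le (fun y : {y // y ∈ t} => !(sodA y.1 == sodA x)) t.attach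
  simp at h2
  simp
  omega

def specialLargestGap_alt (arr : List Int) : Int := goB arr

-- ===== PRECONDITION & SPEC =====
-- digit sum of a nonnegative integer, independent of the ports (used only to state Pre_)
def pvDigitSumGo : Nat → Nat → Nat
  | 0, _ => 0
  | f + 1, n => if n = 0 then 0 else n % 10 + pvDigitSumGo f (n / 10)

def pvDigitSum (n : Nat) : Nat := pvDigitSumGo n n

-- Pre_ excludes exactly the inputs on which A does not return: on a negative element A's sod loop
-- diverges (n //= 10 never reaches 0), and on a digit sum ≥ 64 A raises IndexError (its arrays have 64 slots).
def Pre_specialLargestGap (arr : List Int) : Prop :=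
  ∀ x ∈ arr, 0 ≤ x ∧ pvDigitSum x.toNat < 64
instance (arr : List Int) : Decidable (Pre_specialLargestGap arr) := by
  unfold Pre_specialLargestGap; infer_instance

def pvWitness_specialLargestGap : List Int := [29, 92, 5, 1000000]

def Spec_specialLargestGap (arr : List Int) (out : Int) : Prop := out = specialLargestGap_alt arr
instance (arr : List Int) (out : Int) : Decidable (Spec_specialLargestGap arr out) := by
  unfold Spec_specialLargestGap; infer_instance

-- ===== CLAIM (what is proved, stated in full; the proofs are below) =====
def Claim_equal_specialLargestGap : Prop :=
  ∀ (arr : List Int), Dom_specialLargestGap arr → Pre_specialLargestGap arr →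
    Spec_specialLargestGap arr (specialLargestGap arr)

-- ===== LEMMAS AND PROOFS =====

-- digit-sum basics ---------------------------------------------------------

theorem pvDigitSumGo_congr (n : Nat) : ∀ f g, n ≤ f → n ≤ g →
    pvDigitSumGo f n = pvDigitSumGo g n := by
  induction n using Nat.strong_induction_on with
  | _ n ih =>
    intro f g hf hg
    rcases Nat.eq_zero_or_pos n with h0 | hp
    · subst h0
      cases f <;> cases g <;> simp [pvDigitSumGo]
    · obtain ⟨f', rfl⟩ : ∃ f', f = f' + 1 := ⟨f - 1, by omega⟩
      obtain ⟨g', rfl⟩ : ∃ g', g = g' + 1 := ⟨g - 1, by omega⟩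
      have hlt : n / 10 < n := Nat.div_lt_self hp (by norm_num)
      simp only [pvDigitSumGo, if_neg (by omega : ¬ n = 0)]
      rw [ih (n / 10) hlt f' g' (by omega) (by omega)]

theorem pvDigitSum_unfold (n : Nat) :
    pvDigitSum n = if n = 0 then 0 else n % 10 + pvDigitSum (n / 10) := by
  rcases Nat.eq_zero_or_pos n with h0 | hp
  · subst h0; simp [pvDigitSum, pvDigitSumGo]
  · obtain ⟨n', rfl⟩ : ∃ n', n = n' + 1 := ⟨n - 1, by omega⟩
    simp only [pvDigitSum, pvDigitSumGo, if_neg (by omega : ¬ n' + 1 = 0)]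
    rw [pvDigitSumGo_congr ((n' + 1) / 10) n' ((n' + 1) / 10)
      (by have := Nat.div_lt_self (by omega : 0 < n' + 1) (by norm_num : 1 < 10); omega)
      (Nat.le_refl _)]

theorem sodGo_eq (f : Nat) : ∀ (n s : Int), 0 ≤ n → n ≤ (f : Int) →
    sodGo f n s = s + (pvDigitSum n.toNat : Int) := by
  induction f with
  | zero =>
    intro n s h0 hf
    have : n = 0 := by omega
    subst this
    simp [sodGo, pvDigitSum, pvDigitSumGo]
  | succ f ih =>
    intro n s h0 hf
    by_cases hz : n = 0
    · subst hz; simp [sodGo, pvDigitSum, pvDigitSumGo]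
    · have hm : PySem.Int.mod n 10 = ((n.toNat % 10 : Nat) : Int) := by
        have : n = ((n.toNat : Nat) : Int) := by omega
        rw [this]; exact_mod_cast PySem.Int.mod_natCast n.toNat 10
      have hd : PySem.Int.floordiv n 10 = ((n.toNat / 10 : Nat) : Int) := by
        have : n = ((n.toNat : Nat) : Int) := by omega
        rw [this]; exact_mod_cast PySem.Int.floordiv_natCast n.toNat 10
      rw [sodGo, if_neg hz, hm, hd, ih _ _ (by positivity) (by
        have : n.toNat / 10 < n.toNat := Nat.div_lt_self (by omega) (by norm_num)
        omega)]
      rw [pvDigitSum_unfold n.toNat, if_neg (by omega)]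
      push_cast
      have : (((n.toNat : Int)) / 10).toNat = n.toNat / 10 := by omega
      rw [this]
      ring

theorem sodA_eq (n : Int) (h : 0 ≤ n) : sodA n = (pvDigitSum n.toNat : Int) := by
  rw [sodA, sodGo_eq _ _ _ h (by omega)]; ring

-- proof-side vocabulary ----------------------------------------------------

def pvMinStep (o : Option Int) (i : Int) : Option Int :=
  some (match o with | none => i | some v => min v i)

def pvStepA (st : List (Option Int) × List Int × List Int) (i : Int) :
    List (Option Int) × List Int × List Int :=
  let s := (sodA i).toNat
  (st.1.set s (some (match st.1.getD s none with | none => i | some v => min v i)),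
   st.2.1.set s (max (st.2.1.getD s (-1)) i),
   st.2.2.set s (st.2.2.getD s 0 + 1))

def pvBucket (arr : List Int) (s : Int) : List Int := arr.filter (fun i => sodA i == s)

def pvGap (l : List Int) : Int :=
  match l with
  | [] => 0
  | v :: rest => rest.foldl max v - rest.foldl min v

def pvP (arr : List Int) (s : Int) : Bool := 2 ≤ (pvBucket arr s).length

def pvStepC (arr : List Int) (a s : Int) : Int :=
  if pvP arr s then max a (pvGap (pvBucket arr s)) else a

-- List.getD / set helpers --------------------------------------------------

theorem pvGetD_set_self {α : Type} (l : List α) (i : Nat) (a d : α) (h : i < l.length) :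
    (l.set i a).getD i d = a := by
  simp [List.getD, h]

theorem pvGetD_set_ne {α : Type} (l : List α) (i j : Nat) (a d : α) (h : i ≠ j) :
    (l.set i a).getD j d = l.getD j d := by
  simp [List.getD, h]

theorem pvGetD_replicate {α : Type} (n i : Nat) (x d : α) (h : i < n) :
    (List.replicate n x).getD i d = x := by
  simp [List.getD, h]

-- A-side loop invariant ----------------------------------------------------

theorem pvFoldA_inv (l : List Int) : ∀ (m : List (Option Int)) (M c : List Int),
    m.length = 64 → M.length = 64 → c.length = 64 → ∀ s : Nat, s < 64 →
    ((l.foldl pvStepA (m, M, c)).2.2.getD s 0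
        = c.getD s 0 + ((l.filter (fun i => (sodA i).toNat == s)).length : Int))
    ∧ ((l.foldl pvStepA (m, M, c)).2.1.getD s (-1)
        = (l.filter (fun i => (sodA i).toNat == s)).foldl max (M.getD s (-1)))
    ∧ ((l.foldl pvStepA (m, M, c)).1.getD s none
        = (l.filter (fun i => (sodA i).toNat == s)).foldl pvMinStep (m.getD s none)) := by
  induction l with
  | nil => intro m M c hm hM hc s hs; simp
  | cons x t ih =>
    intro m M c hm hM hc s hs
    have hstep : (x :: t).foldl pvStepA (m, M, c) = t.foldl pvStepA (pvStepA (m, M, c) x) :=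
      List.foldl_cons
    set tx := (sodA x).toNat with htx
    have h1 : (pvStepA (m, M, c) x).1.length = 64 := by simp [pvStepA, hm]
    have h2 : (pvStepA (m, M, c) x).2.1.length = 64 := by simp [pvStepA, hM]
    have h3 : (pvStepA (m, M, c) x).2.2.length = 64 := by simp [pvStepA, hc]
    obtain ⟨ihc, ihM, ihm⟩ := ih (pvStepA (m, M, c) x).1 (pvStepA (m, M, c) x).2.1
      (pvStepA (m, M, c) x).2.2 h1 h2 h3 s hs
    by_cases hx : tx = s
    · have hfil : (x :: t).filter (fun i => (sodA i).toNat == s)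
          = x :: t.filter (fun i => (sodA i).toNat == s) := by
        simp [← htx, hx]
      constructor
      · rw [hstep, ihc, hfil, pvStepA]
        simp only [← htx, hx]
        rw [pvGetD_set_self _ _ _ _ (by omega)]
        simp only [List.length_cons]
        push_cast
        ring
      constructor
      · rw [hstep, ihM, hfil, pvStepA]
        simp only [← htx, hx]
        rw [pvGetD_set_self _ _ _ _ (by omega)]
        rfl
      · rw [hstep, ihm, hfil, pvStepA]
        simp only [← htx, hx]
        rw [pvGetD_set_self _ _ _ _ (by omega)]
        rfl
    · have hfil : (x :: t).filter (fun i => (sodA i).toNat == s)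
          = t.filter (fun i => (sodA i).toNat == s) := by
        simp [← htx, hx]
      refine ⟨?_, ?_, ?_⟩
      · rw [hstep, ihc, hfil, pvStepA]
        simp only [← htx]
        rw [pvGetD_set_ne _ _ _ _ _ hx]
      · rw [hstep, ihM, hfil, pvStepA]
        simp only [← htx]
        rw [pvGetD_set_ne _ _ _ _ _ hx]
      · rw [hstep, ihm, hfil, pvStepA]
        simp only [← htx]
        rw [pvGetD_set_ne _ _ _ _ _ hx]

-- bridges ------------------------------------------------------------------

theorem pvMinStep_some (l : List Int) : ∀ x : Int,
    l.foldl pvMinStep (some x) = some (l.foldl min x) := by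
  induction l with
  | nil => intro x; rfl
  | cons y t ih => intro x; simp only [List.foldl_cons]; exact ih (min x y)

theorem pvGap_eq_A (v : Int) (rest : List Int) (hv : 0 ≤ v) :
    (v :: rest).foldl max (-1) - (((v :: rest).foldl pvMinStep none).getD 0)
      = pvGap (v :: rest) := by
  simp only [List.foldl_cons]
  have h1 : max (-1 : Int) v = v := by omega
  have h2 : pvMinStep none v = some v := rfl
  rw [h1, h2, pvMinStep_some]
  rfl

-- the A-side sweep is a conditional running max; its exact upper-bound characterization
theorem pvFold_le_iff (arr : List Int) (l : List Int) : ∀ (a c : Int),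
    l.foldl (pvStepC arr) a ≤ c ↔ a ≤ c ∧ ∀ s ∈ l, pvP arr s → pvGap (pvBucket arr s) ≤ c := by
  induction l with
  | nil => intro a c; simp
  | cons s t ih =>
    intro a c
    simp only [List.foldl_cons, List.mem_cons]
    rw [ih]
    unfold pvStepC
    by_cases hp : pvP arr s
    · simp only [hp, if_true, max_le_iff]
      constructor
      · rintro ⟨⟨h1, h2⟩, h3⟩
        exact ⟨h1, by rintro s' (rfl | hm) hp' <;> [exact h2; exact h3 s' hm hp']⟩
      · rintro ⟨h1, h2⟩
        exact ⟨⟨h1, h2 s (Or.inl rfl) hp⟩, fun s' hm hp' => h2 s' (Or.inr hm) hp'⟩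
    · simp only [hp]
      constructor
      · rintro ⟨h1, h2⟩
        exact ⟨h1, by rintro s' (rfl | hm) hp' <;> [exact absurd hp' hp; exact h2 s' hm hp']⟩
      · rintro ⟨h1, h2⟩
        exact ⟨h1, fun s' hm hp' => h2 s' (Or.inr hm) hp'⟩

-- bucket structure under B's partition ------------------------------------

theorem pvBucket_cons_self (x : Int) (t : List Int) :
    pvBucket (x :: t) (sodA x) = x :: t.filter (fun y => sodA y == sodA x) := by
  simp [pvBucket]

theorem pvBucket_cons_ne (x : Int) (t : List Int) (s : Int) (h : s ≠ sodA x) :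
    pvBucket (x :: t) s = pvBucket t s := by
  have hx : ¬ (sodA x = s) := fun hh => h hh.symm
  simp [pvBucket, hx]

theorem pvBucket_rest (x : Int) (t : List Int) (s : Int) (h : s ≠ sodA x) :
    pvBucket (t.filter (fun y => !(sodA y == sodA x))) s = pvBucket t s := by
  unfold pvBucket
  rw [List.filter_filter]
  apply List.filter_congr
  intro y _
  by_cases hy : sodA y = s
  · simp [hy, show ¬ s = sodA x from h]
  · simp [hy]

theorem pvBucket_rest_self (x : Int) (t : List Int) :
    pvBucket (t.filter (fun y => !(sodA y == sodA x))) (sodA x) = [] := by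
  unfold pvBucket
  rw [List.filter_filter]
  apply List.filter_eq_nil_iff.mpr
  intro y _
  by_cases hy : sodA y = sodA x <;> simp [hy]

-- running max/min pulled through an accumulator (List.foldl_assoc specialized to max/min on Int)
theorem pvFoldl_max_pull (zs : List Int) (a b : Int) :
    zs.foldl max (max a b) = max a (zs.foldl max b) := List.foldl_assoc

theorem pvFoldl_min_pull (zs : List Int) (a b : Int) :
    zs.foldl min (min a b) = min a (zs.foldl min b) := List.foldl_assoc

-- B's recursion: the unfolding we use, lower bound, and its two exact bounds ------------

theorem goB_nil : goB [] = -1 := by rw [goB]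

theorem goB_cons (x : Int) (t : List Int) :
    goB (x :: t)
      = (match t.filter (fun y => sodA y == sodA x) with
         | [] => goB (t.filter (fun y => !(sodA y == sodA x)))
         | z :: zs =>
             max (goB (t.filter (fun y => !(sodA y == sodA x))))
               ((z :: zs).foldl max x - (z :: zs).foldl min x)) := by
  rw [goB]
  cases h : t.filter (fun y => sodA y == sodA x) with
  | nil => simp
  | cons z zs =>
    simp [PySem.List.max?_id_cons, PySem.List.min?_id_cons, pvFoldl_max_pull, pvFoldl_min_pull,
      max_comm, min_comm]

theorem goB_best_le (x : Int) (t : List Int) :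
    goB (t.filter (fun y => !(sodA y == sodA x))) ≤ goB (x :: t) := by
  rw [goB_cons]
  cases h : t.filter (fun y => sodA y == sodA x) with
  | nil => simp
  | cons z zs => simp

theorem neg_one_le_goB (l : List Int) : -1 ≤ goB l := by
  induction hn : l.length using Nat.strong_induction_on generalizing l with
  | _ n ih =>
    cases l with
    | nil => rw [goB_nil]
    | cons x t =>
      have hr : (t.filter (fun y => !(sodA y == sodA x))).length < n := by
        have := List.length_filter_le (fun y => !(sodA y == sodA x)) t
        simp at hn; omega
      have := ih _ hr (t.filter (fun y => !(sodA y == sodA x))) rfl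
      calc (-1 : Int) ≤ goB (t.filter (fun y => !(sodA y == sodA x))) := this
        _ ≤ goB (x :: t) := goB_best_le x t

-- every gap of a ≥2-element bucket is attained by goB
theorem goB_ub (l : List Int) : ∀ s : Int, 2 ≤ (pvBucket l s).length →
    pvGap (pvBucket l s) ≤ goB l := by
  induction hn : l.length using Nat.strong_induction_on generalizing l with
  | _ n ih =>
    cases l with
    | nil => intro s hs; simp [pvBucket] at hs
    | cons x t =>
      intro s hs
      have hr : (t.filter (fun y => !(sodA y == sodA x))).length < n := by
        have := List.length_filter_le (fun y => !(sodA y == sodA x)) t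
        simp at hn; omega
      by_cases hsx : s = sodA x
      · subst hsx
        rw [pvBucket_cons_self] at hs ⊢
        cases h : t.filter (fun y => sodA y == sodA x) with
        | nil => rw [h] at hs; simp at hs
        | cons z zs =>
          rw [goB_cons, h]
          exact le_max_right _ _
      · rw [pvBucket_cons_ne x t s hsx] at hs ⊢
        rw [← pvBucket_rest x t s hsx] at hs ⊢
        calc pvGap (pvBucket (t.filter (fun y => !(sodA y == sodA x))) s)
            ≤ goB (t.filter (fun y => !(sodA y == sodA x))) := ih _ hr _ rfl s hs
          _ ≤ goB (x :: t) := goB_best_le x t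

-- goB never exceeds an upper bound of all ≥2-element bucket gaps
theorem goB_le (l : List Int) : ∀ c : Int, -1 ≤ c →
    (∀ s : Int, 2 ≤ (pvBucket l s).length → pvGap (pvBucket l s) ≤ c) → goB l ≤ c := by
  induction hn : l.length using Nat.strong_induction_on generalizing l with
  | _ n ih =>
    cases l with
    | nil => intro c hc _; rw [goB_nil]; exact hc
    | cons x t =>
      intro c hc hb
      have hr : (t.filter (fun y => !(sodA y == sodA x))).length < n := by
        have := List.length_filter_le (fun y => !(sodA y == sodA x)) t
        simp at hn; omega
      have hrest : goB (t.filter (fun y => !(sodA y == sodA x))) ≤ c := by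
        apply ih _ hr _ rfl c hc
        intro s hs
        by_cases hsx : s = sodA x
        · subst hsx; rw [pvBucket_rest_self] at hs; simp at hs
        · rw [pvBucket_rest x t s hsx] at hs ⊢
          rw [← pvBucket_cons_ne x t s hsx] at hs ⊢
          exact hb s hs
      rw [goB_cons]
      cases h : t.filter (fun y => sodA y == sodA x) with
      | nil => simpa [h] using hrest
      | cons z zs =>
        have hb2 : 2 ≤ (pvBucket (x :: t) (sodA x)).length := by
          rw [pvBucket_cons_self, h]; simp
        have hg := hb (sodA x) hb2
        rw [pvBucket_cons_self, h] at hg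
        have hgap : pvGap (x :: z :: zs) = (z :: zs).foldl max x - (z :: zs).foldl min x := rfl
        rw [hgap] at hg
        exact max_le hrest hg

-- ===== VERDICT (by name: the statement is the Claim_ definition above) =====
theorem specialLargestGap_spec : Claim_equal_specialLargestGap := by
  unfold Claim_equal_specialLargestGap
  intro arr _hdom hpre
  unfold Spec_specialLargestGap specialLargestGap_alt
  have hsod : ∀ i ∈ arr, 0 ≤ sodA i ∧ sodA i < 64 := by
    intro i hi
    obtain ⟨h0, h64⟩ := hpre i hi
    rw [sodA_eq i h0]
    constructor
    · positivity
    · exact_mod_cast h64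
  -- A side: reduce to the conditional running max pvStepC over pyRange 0 64 1
  have hA : specialLargestGap arr = (PySem.List.pyRange 0 64 1).foldl (pvStepC arr) (-1) := by
    show (PySem.List.pyRange 0 64 1).foldl
        (fun a s =>
          let st := arr.foldl pvStepA
            (List.replicate 64 (none : Option Int), List.replicate 64 (-1 : Int),
             List.replicate 64 (0 : Int))
          if 2 ≤ st.2.2.getD s.toNat 0 then
            max a (st.2.1.getD s.toNat (-1) - (st.1.getD s.toNat none).getD 0)
          else a) (-1)
      = (PySem.List.pyRange 0 64 1).foldl (pvStepC arr) (-1)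
    apply PySem.List.foldl_congr_mem'
    intro s hs a
    obtain ⟨hs0, hs64⟩ := (PySem.List.mem_pyRange_one).mp hs
    have hsN : s.toNat < 64 := by omega
    obtain ⟨hc, hM, hm⟩ := pvFoldA_inv arr
      (List.replicate 64 (none : Option Int)) (List.replicate 64 (-1 : Int))
      (List.replicate 64 (0 : Int)) (by simp) (by simp) (by simp) s.toNat hsN
    rw [pvGetD_replicate _ _ _ _ hsN] at hc hM hm
    have hfil : arr.filter (fun i => (sodA i).toNat == s.toNat) = pvBucket arr s := by
      unfold pvBucket
      apply List.filter_congr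
      intro i hi
      obtain ⟨h0, _⟩ := hsod i hi
      by_cases h : sodA i = s
      · have : (sodA i).toNat = s.toNat := by omega
        simp [h]
      · have h2 : (sodA i).toNat ≠ s.toNat := by omega
        simp [h, h2]
    rw [hfil] at hc hM hm
    dsimp only
    rw [hc, hM, hm]
    by_cases hp : 2 ≤ (pvBucket arr s).length
    · obtain ⟨v, rest, hb⟩ : ∃ v rest, pvBucket arr s = v :: rest := by
        cases h : pvBucket arr s with
        | nil => rw [h] at hp; simp at hp
        | cons v rest => exact ⟨v, rest, rfl⟩
      have hv0 : 0 ≤ v := by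
        have hv : v ∈ pvBucket arr s := by rw [hb]; exact List.mem_cons_self
        exact (hpre v (List.mem_filter.mp hv).1).1
      rw [if_pos (show (2:Int) ≤ 0 + ((pvBucket arr s).length : Int) by omega)]
      rw [pvStepC, if_pos (by simpa [pvP] using hp)]
      rw [hb, pvGap_eq_A v rest hv0]
    · rw [if_neg (show ¬ (2:Int) ≤ 0 + ((pvBucket arr s).length : Int) by omega),
        pvStepC, if_neg (by simpa [pvP] using hp)]
  show specialLargestGap arr = goB arr
  rw [hA]
  -- antisymmetry between the sweep's characterization and goB's two bounds
  have hfold_self := (pvFold_le_iff arr (PySem.List.pyRange 0 64 1) (-1)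
    ((PySem.List.pyRange 0 64 1).foldl (pvStepC arr) (-1))).mp le_rfl
  apply le_antisymm
  · apply (pvFold_le_iff arr (PySem.List.pyRange 0 64 1) (-1) (goB arr)).mpr
    refine ⟨neg_one_le_goB arr, ?_⟩
    intro s _ hp
    exact goB_ub arr s (by simpa [pvP] using hp)
  · apply goB_le arr _ hfold_self.1
    intro s hs
    -- a ≥2-element bucket pins s to the digit sum of one of its members, hence into 0..63
    have hne : pvBucket arr s ≠ [] := by
      intro hh; rw [hh] at hs; simp at hs
    obtain ⟨y, hy⟩ := List.exists_mem_of_ne_nil _ hne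
    have hy' := List.mem_filter.mp hy
    have hys : sodA y = s := by simpa using hy'.2
    obtain ⟨h0, h64⟩ := hsod y hy'.1
    have hmem : s ∈ PySem.List.pyRange 0 64 1 := by
      rw [PySem.List.mem_pyRange_one]; omega
    exact hfold_self.2 s hmem (by simpa [pvP] using hs)
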